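-- pv_equiv track=rewrite | github.com/skoppaka-67/Tech_M- | LCaaS/as400/AS400 crudNew.py | crud_value
-- ===== SOURCE A (Python) =====
-- dict = { 'Create' :['write'],
--          'Read':['setll', 'setgt', 'read', 'readp', 'readpe', 'reade', 'chain'],
--          'Update' : ['update'],
--          'Delete' : ['delete'] }
--
-- def crud_value(value_items):
--     result = ''
--     for it in dict:
--         if value_items in dict[it]:
--             result = it
--         else:
--             continue
--     return result
-- ===== SOURCE B (Python) =====
-- dict = { 'Create' :['write'],
--          'Read':['setll', 'setgt', 'read', 'readp', 'readpe', 'reade', 'chain'],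
--          'Update' : ['update'],
--          'Delete' : ['delete'] }
--
-- VALUE_TO_CRUD = {v: k for k, vs in dict.items() for v in vs}
--
-- def crud_value(value_items):
--     return VALUE_TO_CRUD.get(value_items, '')
-- ===== Notes on version B (the rewrite author's own statement) =====
-- stated objective: idiomatic
-- what changed: Replaced the per-category loop with membership tests by a module-level inverted map value->category built once, so the function body is a single dictionary lookup with '' default.
import Mathlib
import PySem

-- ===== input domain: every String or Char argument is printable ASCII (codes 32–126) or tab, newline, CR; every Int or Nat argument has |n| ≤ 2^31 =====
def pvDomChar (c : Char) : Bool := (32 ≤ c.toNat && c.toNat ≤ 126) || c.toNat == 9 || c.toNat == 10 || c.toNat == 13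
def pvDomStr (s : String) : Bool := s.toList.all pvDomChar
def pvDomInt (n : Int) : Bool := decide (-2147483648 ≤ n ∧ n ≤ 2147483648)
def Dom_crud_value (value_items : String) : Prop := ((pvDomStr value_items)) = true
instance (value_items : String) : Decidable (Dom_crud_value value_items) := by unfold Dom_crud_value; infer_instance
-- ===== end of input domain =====

-- B replaces A's per-category loop with a module-level inverted value→category map and a single lookup (idiomatic).

-- ===== PORT A =====
-- the module-level dict of A (and of B's module)
def crudDict : PySem.Dict String (List String) :=
  PySem.Dict.ofList
    [ ("Create", ["write"]),
      ("Read",   ["setll", "setgt", "read", "readp", "readpe", "reade", "chain"]),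
      ("Update", ["update"]),
      ("Delete", ["delete"]) ]

def crud_value (value_items : String) : String :=
  -- result = ''; for it in dict: if value_items in dict[it]: result = it else continue; return result
  (PySem.Dict.keys crudDict).foldl
    (fun result it =>
      if value_items ∈ PySem.Dict.getD crudDict it [] then it else result) ""

-- ===== PORT B =====
-- VALUE_TO_CRUD = {v: k for k, vs in dict.items() for v in vs}
def valueToCrud : PySem.Dict String String :=
  (crudDict.items).foldl
    (fun d kvs => kvs.2.foldl (fun d v => d.insert v kvs.1) d)
    PySem.Dict.empty

def crud_value_alt (value_items : String) : String :=
  PySem.Dict.getD valueToCrud value_items ""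

-- ===== PRECONDITION & SPEC =====
def Spec_crud_value (value_items : String) (out : String) : Prop := out = crud_value_alt value_items
instance (value_items : String) (out : String) : Decidable (Spec_crud_value value_items out) := by unfold Spec_crud_value; infer_instance

-- ===== CLAIM (what is proved, stated in full; the proofs are below) =====
def Claim_equal_crud_value : Prop := ∀ (value_items : String), Dom_crud_value value_items → Spec_crud_value value_items (crud_value value_items)

-- ===== LEMMAS AND PROOFS =====

-- ===== VERDICT (by name: the statement is the Claim_ definition above) =====
theorem crud_value_spec : Claim_equal_crud_value := by
  intro v _
  unfold Spec_crud_value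
  by_cases h : v ∈ ["write", "setll", "setgt", "read", "readp", "readpe", "reade", "chain",
                    "update", "delete"]
  · fin_cases h <;> rfl
  · simp only [List.mem_cons, List.not_mem_nil, or_false, not_or] at h
    obtain ⟨h1, h2, h3, h4, h5, h6, h7, h8, h9, h10⟩ := h
    have e : ∀ a : String, v ≠ a → (a == v) = false :=
      fun a hne => beq_eq_false_iff_ne.mpr (Ne.symm hne)
    simp [crud_value, crud_value_alt, crudDict, valueToCrud, PySem.Dict.ofList,
          PySem.Dict.keys, PySem.Dict.getD, PySem.Dict.get?, PySem.Dict.empty,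
          PySem.Dict.insert, PySem.Dict.update, List.find?,
          e _ h1, e _ h2, e _ h3, e _ h4, e _ h5, e _ h6, e _ h7, e _ h8, e _ h9, e _ h10,
          h1, h2, h3, h4, h5, h6, h7, h8, h9, h10]
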